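-- pv_equiv track=rewrite | github.com/Afrim124/radio-transcription-tool | radio_transcription_final_build_clean v3.5.py | is_whisper_artifact
-- ===== SOURCE A (Python) =====
-- def is_whisper_artifact(text):
--     """
--     Check if a text segment contains Whisper prompt artifacts.
--
--     Args:
--         text: Text segment to check
--
--     Returns:
--         True if the text contains Whisper prompt artifacts, False otherwise
--     """
--     if not text or not isinstance(text, str):
--         return False
--
--     text_lower = text.lower().strip()
--
--     # Check for common Whisper prompt artifacts
--     whisper_prompt_indicators = [
--         "deze transcriptie moet alle belangrijke woorden en zinnen bevatten",
--         "maar muziekteksten en jingles kunnen worden overgeslagen",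
--         "transcriptie moet alle belangrijke woorden en zinnen bevatten",
--         "muziekteksten en jingles kunnen worden overgeslagen",
--         "transcriptie",
--         "whisper",
--         "openai",
--         "api",
--         "prompt",
--         "instruction",
--         "alle belangrijke woorden",
--         "zinnen bevatten",
--         "muziekteksten en jingles",
--         "kunnen worden overgeslagen",
--         "radio-uitzending",
--         "nieuws discussies interviews",
--         "focus op spraak",
--         "niet op muziek",
--         "belangrijke woorden en zinnen",
--         "muziekteksten en jingles kunnen worden overgeslagen"
--     ]
--
--     # Check if any of the indicators are present in the text
--     for indicator in whisper_prompt_indicators: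
--         if indicator in text_lower:
--             return True
--
--     # Check for suspicious patterns that might indicate artifacts
--     suspicious_patterns = [
--         "deze transcriptie",
--         "transcriptie moet",
--         "muziekteksten en jingles",
--         "belangrijke woorden",
--         "zinnen bevatten",
--         "overgeslagen",
--         "focus op spraak",
--         "niet op muziek",
--         "nederlandse radio-uitzending",
--         "nieuws discussies interviews",
--         "radio-uitzending met nieuws",
--         "discussies interviews en gesprekken",
--         "focus op spraak en gesprekken",
--         "transcriptie moet alle belangrijke",
--         "woorden en zinnen bevatten",
--         "maar muziekteksten en jingles",
--         "kunnen worden overgeslagen"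
--     ]
--
--     for pattern in suspicious_patterns:
--         if pattern in text_lower:
--             return True
--
--     # Check for repeated prompt-like text (common in artifacts)
--     words = text_lower.split()
--     if len(words) > 3:
--         # Check if the same phrase appears multiple times in the text
--         text_without_spaces = text_lower.replace(" ", "")
--         if len(text_without_spaces) > 20:  # Only check longer texts
--             # Look for repeated substrings that might indicate artifacts
--             for i in range(len(words) - 2):
--                 phrase = " ".join(words[i:i+3])
--                 if len(phrase) > 10 and text_lower.count(phrase) > 1:
--                     return True
--
--     # Check for excessive repetition of specific words (common in artifacts)
--     word_counts = {}
--     for word in words: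
--         if len(word) > 3:  # Only count meaningful words
--             word_counts[word] = word_counts.get(word, 0) + 1
--             if word_counts[word] > 3:  # If a word appears more than 3 times
--                 return True
--
--     # Check for very long repeated sequences (common in corrupted artifacts)
--     if len(text) > 100:
--         # Look for sequences that repeat more than twice
--         for i in range(len(text) - 20):
--             sequence = text[i:i+20]
--             if text.count(sequence) > 2:
--                 return True
--
--     return False
-- ===== SOURCE B (Python) =====
-- def is_whisper_artifact(text):
--     """Same detector, different machinery per stage: one minimal pattern list,
--     find-then-tail search instead of full count scans for repeated phrases,
--     sort + fixed-gap comparison for word frequency, and a positions dictionary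
--     of 20-char windows with a greedy non-overlapping sweep instead of a
--     str.count scan per window."""
--     if not text or not isinstance(text, str):
--         return False
--
--     t = text.lower().strip()
--
--     # Minimal antichain of A's 37 indicator/suspicious patterns: every dropped
--     # pattern contains one of these as a substring, so the disjunction is equal.
--     core_patterns = [
--         "transcriptie",
--         "whisper",
--         "openai",
--         "api",
--         "prompt",
--         "instruction",
--         "zinnen bevatten",
--         "muziekteksten en jingles",
--         "radio-uitzending",
--         "nieuws discussies interviews",
--         "focus op spraak",
--         "niet op muziek",
--         "belangrijke woorden",
--         "overgeslagen",
--         "discussies interviews en gesprekken",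
--     ]
--     if any(p in t for p in core_patterns):
--         return True
--
--     words = t.split()
--
--     # Repeated 3-word phrase: a phrase repeats iff it occurs again after the
--     # end of its first occurrence (find + one tail membership test, no count).
--     if len(words) > 3 and len(t.replace(" ", "")) > 20:
--         for i in range(len(words) - 2):
--             phrase = " ".join(words[i:i+3])
--             if len(phrase) > 10:
--                 j = t.find(phrase)
--                 if j != -1 and phrase in t[j + len(phrase):]:
--                     return True
--
--     # A word (>3 chars) appearing more than 3 times: sort the words, then a
--     # word has >=4 occurrences iff some sorted position equals the one 3 later.
--     ws = sorted(words)
--     for a, b in zip(ws, ws[3:]):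
--         if a == b and len(a) > 3:
--             return True
--
--     # Long repeated sequences: index every 20-char window's start positions in
--     # one pass, then greedily count non-overlapping occurrences per window.
--     if len(text) > 100:
--         pos = {}
--         for i in range(len(text) - 19):
--             pos.setdefault(text[i:i+20], []).append(i)
--         for ps in pos.values():
--             cnt = 0
--             nxt = 0
--             for p in ps:
--                 if p >= nxt:
--                     cnt += 1
--                     nxt = p + 20
--             if cnt > 2:
--                 return True
--
--     return False
-- ===== Notes on version B (the rewrite author's own statement) =====
-- stated objective: faster
-- what changed: B collapses A's two pattern loops into one scan over a 15-pattern minimal antichain, replaces the count-scan repetition test for 3-word phrases by find-first-then-search-the-tail, replaces the incremental word-count dictionary by sort-then-compare-positions-3-apart, and replaces the per-window str.count scan for repeated 20-char sequences by one positions dictionary of all windows plus a greedy non-overlapping sweep per distinct window.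
import Mathlib
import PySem

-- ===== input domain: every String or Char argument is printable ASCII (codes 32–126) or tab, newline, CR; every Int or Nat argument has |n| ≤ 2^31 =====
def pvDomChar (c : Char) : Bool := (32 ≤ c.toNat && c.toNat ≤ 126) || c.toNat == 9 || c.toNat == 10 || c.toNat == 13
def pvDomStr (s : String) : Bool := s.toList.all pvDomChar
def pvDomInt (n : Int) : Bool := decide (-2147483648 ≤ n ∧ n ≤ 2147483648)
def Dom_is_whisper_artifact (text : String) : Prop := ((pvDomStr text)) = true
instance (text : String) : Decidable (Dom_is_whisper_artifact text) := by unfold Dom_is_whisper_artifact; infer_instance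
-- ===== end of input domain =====

-- B (faster, measured): one minimal-antichain pattern scan, find-then-tail search for repeated
-- phrases, sort + gap-3 comparison for word frequency, and a positions dictionary of 20-char
-- windows with a greedy non-overlapping sweep instead of a str.count scan per window.

-- ===== PORT A =====
def pvIndicatorsA : List String := [
  "deze transcriptie moet alle belangrijke woorden en zinnen bevatten",
  "maar muziekteksten en jingles kunnen worden overgeslagen",
  "transcriptie moet alle belangrijke woorden en zinnen bevatten",
  "muziekteksten en jingles kunnen worden overgeslagen",
  "transcriptie", "whisper", "openai", "api", "prompt", "instruction",
  "alle belangrijke woorden", "zinnen bevatten", "muziekteksten en jingles",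
  "kunnen worden overgeslagen", "radio-uitzending", "nieuws discussies interviews",
  "focus op spraak", "niet op muziek", "belangrijke woorden en zinnen",
  "muziekteksten en jingles kunnen worden overgeslagen"]

def pvSuspiciousA : List String := [
  "deze transcriptie", "transcriptie moet", "muziekteksten en jingles",
  "belangrijke woorden", "zinnen bevatten", "overgeslagen", "focus op spraak",
  "niet op muziek", "nederlandse radio-uitzending", "nieuws discussies interviews",
  "radio-uitzending met nieuws", "discussies interviews en gesprekken",
  "focus op spraak en gesprekken", "transcriptie moet alle belangrijke",
  "woorden en zinnen bevatten", "maar muziekteksten en jingles",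
  "kunnen worden overgeslagen"]

-- for i in range(len(words) - 2): phrase = " ".join(words[i:i+3]); if len(phrase) > 10 and text_lower.count(phrase) > 1: return True
def pvPhraseLoopA (tl : String) (words : List String) : Bool :=
  (PySem.List.pyRange 0 ((words.length : Int) - 2)).any (fun i =>
    let phrase := PySem.Str.join " " (PySem.List.slice words (some i) (some (i + 3)))
    decide (10 < PySem.Str.len phrase) && decide (1 < PySem.Str.count tl phrase))

-- for word in words: if len(word) > 3: word_counts[word] = word_counts.get(word,0)+1; if word_counts[word] > 3: return True
def pvWordLoopA : List String → PySem.Dict String Int → Bool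
  | [], _ => false
  | w :: rest, d =>
    if 3 < PySem.Str.len w then
      let c := d.getD w 0 + 1
      if 3 < c then true else pvWordLoopA rest (d.insert w c)
    else pvWordLoopA rest d

-- for i in range(len(text) - 20): sequence = text[i:i+20]; if text.count(sequence) > 2: return True
def pvSeqLoopA (text : String) : Bool :=
  (PySem.List.pyRange 0 (PySem.Str.len text - 20)).any (fun i =>
    decide (2 < PySem.Str.count text (PySem.Str.slice text (some i) (some (i + 20)))))

def is_whisper_artifact (text : String) : Bool :=
  if text = "" then false
  else
    let text_lower := PySem.Str.strip (PySem.Str.lower text)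
    if pvIndicatorsA.any (fun ind => PySem.Str.isIn ind text_lower) then true
    else if pvSuspiciousA.any (fun pat => PySem.Str.isIn pat text_lower) then true
    else
      let words := PySem.Str.split₀ text_lower
      let phraseHit :=
        if 3 < words.length then
          (if 20 < PySem.Str.len (PySem.Str.replace text_lower " " "") then
            pvPhraseLoopA text_lower words
          else false)
        else false
      if phraseHit then true
      else if pvWordLoopA words PySem.Dict.empty then true
      else if 100 < PySem.Str.len text then pvSeqLoopA text
      else false

-- ===== PORT B =====
-- minimal antichain of A's 37 patterns: every dropped pattern contains one of these
def pvCoreB : List String := [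
  "transcriptie", "whisper", "openai", "api", "prompt", "instruction",
  "zinnen bevatten", "muziekteksten en jingles", "radio-uitzending",
  "nieuws discussies interviews", "focus op spraak", "niet op muziek",
  "belangrijke woorden", "overgeslagen", "discussies interviews en gesprekken"]

-- for i in range(len(words)-2): phrase = " ".join(words[i:i+3]);
--   if len(phrase) > 10: j = t.find(phrase); if j != -1 and phrase in t[j+len(phrase):]: return True
def pvPhraseLoopB (t : String) (words : List String) : Bool :=
  (PySem.List.pyRange 0 ((words.length : Int) - 2)).any (fun i =>
    let phrase := PySem.Str.join " " (PySem.List.slice words (some i) (some (i + 3)))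
    decide (10 < PySem.Str.len phrase) &&
      (let j := PySem.Str.find t phrase
       decide (j ≠ -1) &&
         PySem.Str.isIn phrase (PySem.Str.slice t (some (j + PySem.Str.len phrase)) none)))

-- ws = sorted(words); for a, b in zip(ws, ws[3:]): if a == b and len(a) > 3: return True
def pvWordCheckB (words : List String) : Bool :=
  let ws := PySem.List.sorted words (fun w => w)
  (ws.zip (ws.drop 3)).any (fun p => p.1 == p.2 && decide (3 < PySem.Str.len p.1))

-- cnt = 0; nxt = 0; for p in ps: if p >= nxt: cnt += 1; nxt = p + 20
def pvGreedyB (ps : List Int) : Int :=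
  (ps.foldl (fun (st : Int × Int) p => if st.2 ≤ p then (st.1 + 1, p + 20) else st) (0, 0)).1

-- pos = {}; for i in range(len(text)-19): pos.setdefault(text[i:i+20], []).append(i)
-- for ps in pos.values(): if greedy-count(ps) > 2: return True
def pvSeqCheckB (text : String) : Bool :=
  let d := (PySem.List.pyRange 0 (PySem.Str.len text - 19)).foldl
    (fun d i => d.modify (PySem.Str.slice text (some i) (some (i + 20))) [] (fun l => l ++ [i]))
    (PySem.Dict.empty : PySem.Dict String (List Int))
  d.values.any (fun ps => decide (2 < pvGreedyB ps))

def is_whisper_artifact_alt (text : String) : Bool :=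
  if text = "" then false
  else
    let t := PySem.Str.strip (PySem.Str.lower text)
    if pvCoreB.any (fun p => PySem.Str.isIn p t) then true
    else
      let words := PySem.Str.split₀ t
      if (decide (3 < words.length) && decide (20 < PySem.Str.len (PySem.Str.replace t " " "")))
          && pvPhraseLoopB t words then true
      else if pvWordCheckB words then true
      else if 100 < PySem.Str.len text then pvSeqCheckB text
      else false

-- ===== PRECONDITION & SPEC =====
def Spec_is_whisper_artifact (text : String) (out : Bool) : Prop := out = is_whisper_artifact_alt text
instance (text : String) (out : Bool) : Decidable (Spec_is_whisper_artifact text out) := by unfold Spec_is_whisper_artifact; infer_instance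

-- ===== CLAIM =====
def Claim_equal_is_whisper_artifact : Prop := ∀ (text : String), Dom_is_whisper_artifact text → Spec_is_whisper_artifact text (is_whisper_artifact text)

-- ===== LEMMAS AND PROOFS =====

-- ---------- stage 1: pattern lists ----------

lemma any_isIn_reduce (full core : List String) (t : String)
    (h1 : ∀ q ∈ full, ∃ p ∈ core, PySem.Str.isIn p q = true)
    (h2 : ∀ p ∈ core, p ∈ full) :
    full.any (fun p => PySem.Str.isIn p t) = core.any (fun p => PySem.Str.isIn p t) := by
  rw [Bool.eq_iff_iff]
  simp only [List.any_eq_true]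
  constructor
  · rintro ⟨q, hq, hqt⟩
    obtain ⟨p, hp, hpq⟩ := h1 q hq
    refine ⟨p, hp, ?_⟩
    rw [PySem.Str.isIn_iff_infix] at *
    exact hpq.trans hqt
  · rintro ⟨p, hp, hpt⟩
    exact ⟨p, h2 p hp, hpt⟩

lemma patterns_eq (t : String) :
    (pvIndicatorsA.any (fun p => PySem.Str.isIn p t)
      || pvSuspiciousA.any (fun p => PySem.Str.isIn p t))
      = pvCoreB.any (fun p => PySem.Str.isIn p t) := by
  rw [← List.any_append]
  exact any_isIn_reduce (pvIndicatorsA ++ pvSuspiciousA) pvCoreB t (by decide) (by decide)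

-- ---------- str.count characterisation ----------

lemma pvGo_zero (sub l : List Char) (acc : Nat) : PySem.Chars.count.go sub 0 l acc = acc := rfl

lemma pvGo_nil (sub : List Char) (f acc : Nat) : PySem.Chars.count.go sub (f+1) [] acc = acc := rfl

lemma pvGo_cons (sub : List Char) (f acc : Nat) (h : Char) (t : List Char) :
    PySem.Chars.count.go sub (f+1) (h::t) acc =
      if sub.isPrefixOf (h::t) then PySem.Chars.count.go sub f (List.drop sub.length (h::t)) (acc+1)
      else PySem.Chars.count.go sub f t acc := rfl

lemma pvGo_acc (sub : List Char) (f : Nat) : ∀ (l : List Char) (acc : Nat),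
    PySem.Chars.count.go sub f l acc = acc + PySem.Chars.count.go sub f l 0 := by
  induction f with
  | zero => intro l acc; simp [pvGo_zero]
  | succ g ih =>
    intro l acc
    cases l with
    | nil => simp [pvGo_nil]
    | cons h t =>
      rw [pvGo_cons, pvGo_cons]
      split_ifs with hp
      · rw [ih _ (acc+1), ih _ (0+1)]; omega
      · rw [ih t acc]

lemma pvGo_norm (sub : List Char) (hsub : sub ≠ []) :
    ∀ (n : Nat) (l : List Char) (f : Nat), l.length = n → l.length ≤ f →
      PySem.Chars.count.go sub f l 0 = PySem.Chars.count.go sub l.length l 0 := by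
  intro n
  induction n using Nat.strong_induction_on with
  | _ n ih =>
    intro l f hn hf
    cases l with
    | nil => cases f <;> simp [pvGo_nil, pvGo_zero]
    | cons h t =>
      have hk : 1 ≤ sub.length := by cases sub <;> simp_all
      have htlen : (h::t).length = t.length + 1 := rfl
      obtain ⟨g, rfl⟩ : ∃ g, f = g + 1 := by
        cases f
        · simp [htlen] at hf
        · exact ⟨_, rfl⟩
      have hnn : n = t.length + 1 := by rw [← hn, htlen]
      have hfg : t.length ≤ g := by
        rw [htlen] at hf; omega
      rw [pvGo_cons, htlen, pvGo_cons]
      split_ifs with hp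
      · have hdlen : (List.drop sub.length (h::t)).length = t.length + 1 - sub.length := by
          simp [htlen]
        have hlt : (List.drop sub.length (h::t)).length < n := by rw [hdlen]; omega
        rw [pvGo_acc _ _ _ 1, pvGo_acc _ _ _ 1,
          ih _ hlt _ g rfl (by rw [hdlen]; omega),
          ih _ hlt _ t.length rfl (by rw [hdlen]; omega)]
      · rw [ih t.length (by omega) t g rfl (by omega),
          ih t.length (by omega) t t.length rfl (by omega)]

lemma pvCount_go (l sub : List Char) (hsub : sub ≠ []) :
    PySem.Chars.count l sub = PySem.Chars.count.go sub l.length l 0 := by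
  unfold PySem.Chars.count
  simp [hsub]

lemma pvInfix_of_prefix_drop {sub l : List Char} {j : Nat} (h : sub <+: l.drop j) : sub <:+: l :=
  h.isInfix.trans (List.drop_suffix j l).isInfix

lemma pvCount_step (l sub : List Char) (hsub : sub ≠ []) :
    PySem.Chars.count l sub =
      if PySem.Chars.isIn sub l then
        PySem.Chars.count (l.drop ((PySem.Chars.find l sub).toNat + sub.length)) sub + 1
      else 0 := by
  have hk : 1 ≤ sub.length := by cases sub <;> simp_all
  induction l with
  | nil =>
    have hni : PySem.Chars.isIn sub [] = false := by
      rw [PySem.Chars.isIn_eq_false_iff]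
      intro h
      exact hsub (List.eq_nil_of_infix_nil h)
    rw [pvCount_go _ _ hsub, hni]
    simp [pvGo_zero]
  | cons h t ih =>
    rw [pvCount_go _ _ hsub]
    have htlen : (h::t).length = t.length + 1 := rfl
    rw [htlen, pvGo_cons]
    by_cases hp : sub.isPrefixOf (h::t) = true
    · -- match at position 0
      rw [if_pos hp]
      have hpre : sub <+: (h::t) := List.isPrefixOf_iff_prefix.mp hp
      have hinf : PySem.Chars.isIn sub (h::t) = true := by
        rw [← PySem.Chars.exists_prefix_drop_iff_isIn]
        exact ⟨0, by simpa using hpre⟩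
      have hfind0 : (PySem.Chars.find (h::t) sub).toNat = 0 := by
        have hnn : 0 ≤ PySem.Chars.find (h::t) sub := by
          rw [PySem.Chars.find_nonneg_iff]
          exact hpre.isInfix
        obtain ⟨_, hmin⟩ := PySem.Chars.find_spec hnn
        by_contra hne
        exact hmin 0 (by omega) (by simpa using hpre)
      rw [hinf, if_pos rfl, hfind0]
      have hd : (List.drop sub.length (h::t)).length ≤ t.length := by
        simp [htlen]; omega
      rw [pvGo_acc, pvGo_norm sub hsub _ _ t.length rfl hd,
        ← pvCount_go _ _ hsub]
      simp only [Nat.zero_add]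
      omega
    · rw [if_neg hp]
      have hnp : ¬ sub <+: (h::t) := fun hc => hp (List.isPrefixOf_iff_prefix.mpr hc)
      rw [← pvCount_go _ _ hsub] at *
      rw [ih]
      by_cases hit : PySem.Chars.isIn sub t = true
      · have hinf : PySem.Chars.isIn sub (h::t) = true := by
          rw [← PySem.Chars.exists_prefix_drop_iff_isIn]
          rw [← PySem.Chars.exists_prefix_drop_iff_isIn] at hit
          obtain ⟨j, hj⟩ := hit
          exact ⟨j + 1, by simpa using hj⟩
        rw [hit, if_pos rfl, hinf, if_pos rfl]
        -- find (h::t) sub = find t sub + 1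
        have hnt : 0 ≤ PySem.Chars.find t sub := by
          rw [PySem.Chars.find_nonneg_iff]
          rw [← PySem.Chars.exists_prefix_drop_iff_isIn] at hit
          obtain ⟨j, hj⟩ := hit
          exact pvInfix_of_prefix_drop hj
        have hnn : 0 ≤ PySem.Chars.find (h::t) sub := by
          rw [PySem.Chars.find_nonneg_iff]
          rw [← PySem.Chars.exists_prefix_drop_iff_isIn] at hinf
          obtain ⟨j, hj⟩ := hinf
          exact pvInfix_of_prefix_drop hj
        obtain ⟨hpt, hmt⟩ := PySem.Chars.find_spec hnt
        obtain ⟨hpl, hml⟩ := PySem.Chars.find_spec hnn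
        set jt := (PySem.Chars.find t sub).toNat with hjt
        set jl := (PySem.Chars.find (h::t) sub).toNat with hjl
        have hne0 : jl ≠ 0 := by
          intro hz
          rw [hz] at hpl
          exact hnp (by simpa using hpl)
        have hle1 : jl ≤ jt + 1 := by
          by_contra hgt
          exact hml (jt + 1) (by omega) (by simpa using hpt)
        have hge1 : jt + 1 ≤ jl := by
          by_contra hlt
          have hj1 : jl - 1 < jt := by omega
          have : sub <+: t.drop (jl - 1) := by
            have hdd : (h::t).drop jl = t.drop (jl - 1) := by
              obtain ⟨m, hm⟩ : ∃ m, jl = m + 1 := ⟨jl - 1, by omega⟩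
              rw [hm]
              simp
            rw [hdd] at hpl
            simpa using hpl
          exact hmt (jl - 1) hj1 this
        have hjeq : jl = jt + 1 := by omega
        rw [hjeq]
        have : (h::t).drop (jt + 1 + sub.length) = t.drop (jt + sub.length) := by
          have : jt + 1 + sub.length = (jt + sub.length) + 1 := by omega
          rw [this]
          simp
        rw [this]
      · have hit' : PySem.Chars.isIn sub t = false := by
          cases hx : PySem.Chars.isIn sub t
          · rfl
          · exact absurd hx hit
        have hinf : PySem.Chars.isIn sub (h::t) = false := by
          rw [PySem.Chars.isIn_eq_false_iff]
          intro hc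
          rcases List.infix_cons_iff.mp hc with hc1 | hc2
          · exact hnp hc1
          · rw [PySem.Chars.isIn_eq_false_iff] at hit'
            exact hit' hc2
        rw [hit', hinf]
        simp

lemma pvCount_pos_iff (l sub : List Char) (hsub : sub ≠ []) :
    0 < PySem.Chars.count l sub ↔ PySem.Chars.isIn sub l = true := by
  rw [pvCount_step l sub hsub]
  split_ifs with h <;> simp [h]

-- ---------- greedy / occurrence positions ----------

def pvOcc (sub l : List Char) : List Nat :=
  (List.range l.length).filter (fun i => sub.isPrefixOf (l.drop i))

def pvGreedyN (L : Nat) : List Nat → Nat → Nat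
  | [], _ => 0
  | p :: r, nxt => if nxt ≤ p then pvGreedyN L r (p + L) + 1 else pvGreedyN L r nxt

lemma pvGreedy_skip (L : Nat) (l1 : List Nat) : ∀ (l2 : List Nat) (nxt : Nat),
    (∀ x ∈ l1, x < nxt) → pvGreedyN L (l1 ++ l2) nxt = pvGreedyN L l2 nxt := by
  induction l1 with
  | nil => intro l2 nxt _; rfl
  | cons p r ih =>
    intro l2 nxt h
    have hp : p < nxt := h p (by simp)
    simp only [List.cons_append, pvGreedyN, if_neg (by omega : ¬ nxt ≤ p)]
    exact ih l2 nxt (fun x hx => h x (by simp [hx]))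

lemma pvGreedy_shift (L c : Nat) : ∀ (l : List Nat) (nxt : Nat),
    pvGreedyN L (l.map (c + ·)) (c + nxt) = pvGreedyN L l nxt := by
  intro l
  induction l with
  | nil => intro nxt; rfl
  | cons p r ih =>
    intro nxt
    simp only [List.map_cons, pvGreedyN]
    have : (c + nxt ≤ c + p) ↔ (nxt ≤ p) := by omega
    rw [if_congr this rfl rfl]
    split_ifs with h
    · rw [show c + p + L = c + (p + L) by omega, ih]
    · exact ih nxt

lemma pvGreedy_ge1 (L : Nat) : ∀ (l : List Nat) (nxt : Nat),
    1 ≤ pvGreedyN L l nxt → ∃ q ∈ l, nxt ≤ q := by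
  intro l
  induction l with
  | nil => intro nxt h; simp [pvGreedyN] at h
  | cons p r ih =>
    intro nxt h
    simp only [pvGreedyN] at h
    split_ifs at h with hp
    · exact ⟨p, by simp, hp⟩
    · obtain ⟨q, hq, hle⟩ := ih nxt h
      exact ⟨q, by simp [hq], hle⟩

lemma pvGreedy_ge2 (L : Nat) : ∀ (l : List Nat) (nxt : Nat),
    2 ≤ pvGreedyN L l nxt → ∃ q ∈ l, nxt + L ≤ q := by
  intro l
  induction l with
  | nil => intro nxt h; simp [pvGreedyN] at h
  | cons p r ih =>
    intro nxt h
    simp only [pvGreedyN] at h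
    split_ifs at h with hp
    · obtain ⟨q, hq, hle⟩ := pvGreedy_ge1 L r (p + L) (by omega)
      exact ⟨q, by simp [hq], by omega⟩
    · obtain ⟨q, hq, hle⟩ := ih nxt h
      exact ⟨q, by simp [hq], hle⟩

lemma pvGreedy_ge3 (L : Nat) : ∀ (l : List Nat) (nxt : Nat),
    3 ≤ pvGreedyN L l nxt → ∃ p ∈ l, nxt ≤ p ∧ ∃ q ∈ l, p + 2 * L ≤ q := by
  intro l
  induction l with
  | nil => intro nxt h; simp [pvGreedyN] at h
  | cons p r ih =>
    intro nxt h
    simp only [pvGreedyN] at h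
    split_ifs at h with hp
    · obtain ⟨q, hq, hle⟩ := pvGreedy_ge2 L r (p + L) (by omega)
      exact ⟨p, by simp, hp, q, by simp [hq], by omega⟩
    · obtain ⟨p', hp', hle, q, hq, hq2⟩ := ih nxt h
      exact ⟨p', by simp [hp'], hle, q, by simp [hq], hq2⟩

lemma pvCount_eq_greedy (sub : List Char) (hsub : sub ≠ []) :
    ∀ (n : Nat) (l : List Char), l.length = n →
      PySem.Chars.count l sub = pvGreedyN sub.length (pvOcc sub l) 0 := by
  have hk : 1 ≤ sub.length := by cases sub <;> simp_all
  intro n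
  induction n using Nat.strong_induction_on with
  | _ n ih =>
    intro l hn
    by_cases hin : PySem.Chars.isIn sub l = true
    · have hnn : 0 ≤ PySem.Chars.find l sub := by
        rw [PySem.Chars.find_nonneg_iff]
        exact (PySem.Chars.isIn_iff_infix sub l).mp hin
      obtain ⟨hpre, hmin⟩ := PySem.Chars.find_spec hnn
      set j0 := (PySem.Chars.find l sub).toNat with hj0
      set k := sub.length with hkk
      have hj0len : j0 + k ≤ l.length := by
        have h1 : sub.length ≤ (l.drop j0).length := hpre.length_le
        have h2 : l.drop j0 ≠ [] := by
          intro hc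
          rw [hc] at hpre
          exact hsub (List.prefix_nil.mp hpre)
        have h3 : j0 < l.length := by
          by_contra hge
          exact h2 (List.drop_eq_nil_of_le (by omega))
        simp only [List.length_drop] at h1
        omega
      set m := l.length - (j0 + k) with hm
      set P : Nat → Bool := fun i => sub.isPrefixOf (l.drop i) with hP
      -- decompose the occurrence list
      have hocc : pvOcc sub l =
          j0 :: (((List.range (k-1)).map (fun x => j0 + (x+1))).filter P
            ++ (pvOcc sub (l.drop (j0+k))).map ((j0+k) + ·)) := by
        have hsplit : List.range l.length =
            (List.range j0 ++ (List.range k).map (j0 + ·))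
              ++ (List.range m).map ((j0+k) + ·) := by
          rw [← List.range_add, ← List.range_add]
          congr 1
          omega
        have h1 : (List.range j0).filter P = [] := by
          rw [List.filter_eq_nil_iff]
          intro i hi
          rw [List.mem_range] at hi
          simp only [hP, Bool.not_eq_true]
          rw [Bool.eq_false_iff]
          intro hc
          exact hmin i hi (List.isPrefixOf_iff_prefix.mp hc)
        obtain ⟨k', hkeq⟩ : ∃ k', k = k' + 1 := ⟨k - 1, by omega⟩
        have h2 : ((List.range k).map (j0 + ·)).filter P =
            j0 :: ((List.range (k-1)).map (fun x => j0 + (x+1))).filter P := by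
          have hr : List.range k = 0 :: (List.range k').map Nat.succ := by
            rw [hkeq, List.range_succ_eq_map]
          rw [hr]
          simp only [List.map_cons, List.map_map, Nat.add_zero]
          rw [List.filter_cons]
          have hPj0 : P j0 = true := by
            simp only [hP]
            exact List.isPrefixOf_iff_prefix.mpr hpre
          rw [if_pos hPj0]
          have hk'eq : k - 1 = k' := by omega
          rw [hk'eq]
          have hfun : ((fun x => j0 + x) ∘ Nat.succ) = (fun x => j0 + (x + 1)) := by
            funext x
            simp [Function.comp]
          rw [hfun]
        have h3 : ((List.range m).map ((j0+k) + ·)).filter P =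
            (pvOcc sub (l.drop (j0+k))).map ((j0+k) + ·) := by
          rw [List.filter_map]
          have hrhs : pvOcc sub (l.drop (j0+k)) =
              (List.range m).filter (fun i => sub.isPrefixOf ((l.drop (j0+k)).drop i)) := by
            unfold pvOcc
            rw [List.length_drop, ← hm]
          rw [hrhs]
          congr 1
          apply List.filter_congr
          intro i _
          simp only [Function.comp, hP, List.drop_drop]
        have hlhs : pvOcc sub l = (List.range l.length).filter P := rfl
        rw [hlhs, hsplit, List.filter_append, List.filter_append, h1, h2, h3]
        simp
      rw [hocc]
      have hmid : ∀ x ∈ ((List.range (k-1)).map (fun x => j0 + (x+1))).filter P,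
          x < j0 + k := by
        intro x hx
        rw [List.mem_filter] at hx
        obtain ⟨i, hi, rfl⟩ := List.mem_map.mp hx.1
        rw [List.mem_range] at hi
        omega
      simp only [pvGreedyN, if_pos (Nat.zero_le j0)]
      rw [pvGreedy_skip _ _ _ _ hmid]
      have hshift : pvGreedyN k ((pvOcc sub (l.drop (j0+k))).map ((j0+k) + ·)) (j0+k)
          = pvGreedyN k (pvOcc sub (l.drop (j0+k))) 0 := by
        have := pvGreedy_shift k (j0+k) (pvOcc sub (l.drop (j0+k))) 0
        simpa using this
      rw [hshift]
      have hstep := pvCount_step l sub hsub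
      rw [if_pos hin] at hstep
      rw [hstep]
      have hdlen : (l.drop (j0+k)).length = m := by
        rw [List.length_drop]
      have hmlt : m < n := by omega
      rw [ih m hmlt (l.drop (j0+k)) hdlen]
    · have hstep := pvCount_step l sub hsub
      rw [if_neg hin] at hstep
      rw [hstep]
      have hocc : pvOcc sub l = [] := by
        unfold pvOcc
        rw [List.filter_eq_nil_iff]
        intro i hi
        rw [Bool.not_eq_true, Bool.eq_false_iff]
        intro hc
        apply hin
        rw [← PySem.Chars.exists_prefix_drop_iff_isIn]
        exact ⟨i, List.isPrefixOf_iff_prefix.mp hc⟩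
      rw [hocc]
      rfl

-- ---------- stage 2: phrase repetition ----------

lemma pvRepeat_eq (t phrase : String) (hp : phrase.toList ≠ []) :
    decide (1 < PySem.Str.count t phrase) =
      (decide (PySem.Str.find t phrase ≠ -1) &&
        PySem.Str.isIn phrase
          (PySem.Str.slice t (some (PySem.Str.find t phrase + PySem.Str.len phrase)) none)) := by
  have hstep := pvCount_step t.toList phrase.toList hp
  by_cases hin : PySem.Chars.isIn phrase.toList t.toList = true
  · have hnn : 0 ≤ PySem.Chars.find t.toList phrase.toList := by
      rw [PySem.Chars.find_nonneg_iff]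
      exact (PySem.Chars.isIn_iff_infix _ _).mp hin
    set j0 := (PySem.Chars.find t.toList phrase.toList).toNat with hj0
    have hslice : (PySem.Str.slice t
        (some (PySem.Str.find t phrase + PySem.Str.len phrase)) none).toList =
        t.toList.drop (j0 + phrase.toList.length) := by
      rw [PySem.Str.toList_slice, PySem.Chars.slice_eq_listSlice]
      have hcast : PySem.Str.find t phrase + PySem.Str.len phrase
          = ((j0 + phrase.toList.length : ℕ) : ℤ) := by
        rw [PySem.Str.find_eq, PySem.Str.len_eq, hj0]
        push_cast
        omega
      rw [hcast, PySem.List.slice_from_natCast]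
    have hne : decide (PySem.Str.find t phrase ≠ -1) = true := by
      rw [PySem.Str.find_eq]
      simp only [decide_eq_true_eq]
      omega
    rw [hne, Bool.true_and, PySem.Str.isIn_eq, hslice]
    rw [PySem.Str.count_eq, hstep, if_pos hin]
    have hpos := pvCount_pos_iff (t.toList.drop (j0 + phrase.toList.length)) phrase.toList hp
    cases hx : PySem.Chars.isIn phrase.toList (t.toList.drop (j0 + phrase.toList.length)) with
    | true =>
      have := hpos.mpr hx
      simp only [decide_eq_true_eq]
      omega
    | false =>
      have hz : PySem.Chars.count (t.toList.drop (j0 + phrase.toList.length)) phrase.toList = 0 := by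
        by_contra hc
        have h1 := hpos.mp (by omega)
        rw [h1] at hx
        simp at hx
      rw [hz]
      simp
  · have hin' : PySem.Chars.isIn phrase.toList t.toList = false := by
      cases hx : PySem.Chars.isIn phrase.toList t.toList
      · rfl
      · exact absurd hx hin
    rw [PySem.Str.count_eq, hstep, if_neg (by simp [hin'])]
    have hfneg : PySem.Chars.find t.toList phrase.toList = -1 := by
      rw [PySem.Chars.find_eq_neg_one_iff]
      rw [PySem.Chars.isIn_eq_false_iff] at hin'
      exact hin'
    rw [PySem.Str.find_eq]
    simp [hfneg]

lemma phrase_eq (t : String) (ws : List String) :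
    pvPhraseLoopA t ws = pvPhraseLoopB t ws := by
  unfold pvPhraseLoopA pvPhraseLoopB
  apply List.any_congr rfl
  intro i
  simp only []
  set phrase := PySem.Str.join " " (PySem.List.slice ws (some i) (some (i + 3))) with hph
  by_cases hlen : 10 < PySem.Str.len phrase
  · have hp : phrase.toList ≠ [] := by
      intro hc
      rw [PySem.Str.len_eq, hc] at hlen
      simp at hlen
    simp only [hlen, decide_true, Bool.true_and]
    exact pvRepeat_eq t phrase hp
  · have hl : decide (10 < PySem.Str.len phrase) = false := by
      simp only [decide_eq_false_iff_not]
      exact hlen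
    rw [hl]
    simp

-- ---------- stage 3: word frequency ----------

lemma wordLoop_iff (l : List String) (d : PySem.Dict String Int) :
    pvWordLoopA l d = true ↔
      ∃ w ∈ l, 3 < PySem.Str.len w ∧ 3 < d.getD w 0 + (List.count w l : Int) := by
  induction l generalizing d with
  | nil => simp [pvWordLoopA]
  | cons w rest ih =>
    unfold pvWordLoopA
    by_cases hw : 3 < PySem.Str.len w
    · simp only [if_pos hw]
      by_cases hc : 3 < d.getD w 0 + 1
      · simp only [if_pos hc, true_iff]
        refine ⟨w, by simp, hw, ?_⟩
        have hcc : List.count w (w :: rest) = List.count w rest + 1 := List.count_cons_self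
        rw [hcc]; push_cast; omega
      · simp only [if_neg hc, ih]
        constructor
        · rintro ⟨v, hv, hlv, hcnt⟩
          rw [PySem.Dict.getD_insert] at hcnt
          by_cases hvw : v = w
          · subst hvw
            refine ⟨v, by simp, hlv, ?_⟩
            rw [if_pos rfl] at hcnt
            have hcc : List.count v (v :: rest) = List.count v rest + 1 := List.count_cons_self
            rw [hcc]; push_cast at hcnt ⊢; omega
          · refine ⟨v, by simp [hv], hlv, ?_⟩
            rw [if_neg hvw] at hcnt
            rw [List.count_cons_of_ne (fun a => hvw a.symm)]
            exact hcnt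
        · rintro ⟨v, hv, hlv, hcnt⟩
          by_cases hvw : v = w
          · subst hvw
            have hcc : List.count v (v :: rest) = List.count v rest + 1 := List.count_cons_self
            rw [hcc] at hcnt
            have hvr : v ∈ rest := by
              by_contra hno
              rw [List.count_eq_zero.mpr hno] at hcnt
              push_cast at hcnt; omega
            refine ⟨v, hvr, hlv, ?_⟩
            rw [PySem.Dict.getD_insert, if_pos rfl]
            push_cast at hcnt ⊢; omega
          · have hvr : v ∈ rest := by
              rcases List.mem_cons.mp hv with h | h
              · exact absurd h hvw
              · exact h
            refine ⟨v, hvr, hlv, ?_⟩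
            rw [PySem.Dict.getD_insert, if_neg hvw]
            rw [List.count_cons_of_ne (fun a => hvw a.symm)] at hcnt
            exact hcnt
    · simp only [if_neg hw, ih]
      constructor
      · rintro ⟨v, hv, hlv, hcnt⟩
        have hvw : ¬(v = w) := fun h => hw (h ▸ hlv)
        refine ⟨v, by simp [hv], hlv, ?_⟩
        rw [List.count_cons_of_ne (fun a => hvw a.symm)]
        exact hcnt
      · rintro ⟨v, hv, hlv, hcnt⟩
        have hvw : ¬(v = w) := fun h => hw (h ▸ hlv)
        have hvr : v ∈ rest := by
          rcases List.mem_cons.mp hv with h | h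
          · exact absurd h hvw
          · exact h
        refine ⟨v, hvr, hlv, ?_⟩
        rw [List.count_cons_of_ne (fun a => hvw a.symm)] at hcnt
        exact hcnt

lemma pvTake_rep (w : String) : ∀ (l : List String) (k : Nat),
    List.Pairwise (· ≤ ·) (w :: l) → k ≤ (w :: l).count w →
    (w :: l).take k = List.replicate k w := by
  intro l
  induction l with
  | nil =>
    intro k hp hc
    have h1 : (w :: ([] : List String)).count w = 1 := by simp
    rw [h1] at hc
    match k, hc with
    | 0, _ => rfl
    | 1, _ => rfl
  | cons b l' ih =>
    intro k hp hc
    cases k with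
    | zero => rfl
    | succ k' =>
      by_cases hb : b = w
      · subst hb
        have hp' : List.Pairwise (· ≤ ·) (b :: l') := hp.of_cons
        have hc' : k' ≤ (b :: l').count b := by
          rw [List.count_cons_self] at hc ⊢
          have := List.count_cons_self (a := b) (l := l')
          omega
        have := ih k' hp' hc'
        calc (b :: b :: l').take (k' + 1) = b :: (b :: l').take k' := rfl
          _ = b :: List.replicate k' b := by rw [this]
          _ = List.replicate (k' + 1) b := rfl
      · cases k' with
        | zero => rfl
        | succ k'' =>
          exfalso
          have hcb : (w :: b :: l').count w = 1 + (b :: l').count w := by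
            rw [List.count_cons_self]; omega
          have hcne : (b :: l').count w = l'.count w := by
            rw [List.count_cons_of_ne hb]
          have hwl : w ∈ l' := by
            have : 1 ≤ l'.count w := by omega
            exact List.count_pos_iff.mp (by omega)
          have hwb : w ≤ b := (List.pairwise_cons.mp hp).1 b (by simp)
          have hbw : b ≤ w := (List.pairwise_cons.mp hp.of_cons).1 w hwl
          exact hb (le_antisymm hbw hwb)

lemma pvZip_lift {a : String} {rest : List String} {p : String × String}
    (h : p ∈ rest.zip (rest.drop 3)) :
    p ∈ (a :: rest).zip ((a :: rest).drop 3) := by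
  have hd3 : (a :: rest).drop 3 = rest.drop 2 := rfl
  cases h2 : rest.drop 2 with
  | nil =>
    have : rest.drop 3 = [] := by
      rw [← List.tail_drop, h2]
      rfl
    rw [this] at h
    simp at h
  | cons c cs =>
    have hcs : rest.drop 3 = cs := by
      rw [← List.tail_drop, h2]
      rfl
    rw [hd3, h2]
    rw [hcs] at h
    exact List.mem_cons_of_mem _ h

lemma pvSorted_exists (w : String) : ∀ (srt : List String),
    List.Pairwise (· ≤ ·) srt → 4 ≤ srt.count w →
    ∃ p ∈ srt.zip (srt.drop 3), p.1 = w ∧ p.2 = w := by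
  intro srt
  induction srt with
  | nil => intro _ h4; simp at h4
  | cons a rest ih =>
    intro hp h4
    by_cases ha : a = w
    · subst ha
      have htake := pvTake_rep a rest 4 hp h4
      have h3 : rest.take 3 = [a, a, a] := by
        have : (a :: rest).take 4 = a :: rest.take 3 := rfl
        rw [this] at htake
        exact (List.cons_inj_right a).mp htake
      have hrest : rest = a :: a :: a :: rest.drop 3 := by
        conv_lhs => rw [← List.take_append_drop 3 rest]
        rw [h3]
        rfl
      refine ⟨(a, a), ?_, rfl, rfl⟩
      conv_lhs => rw [hrest]
      simp [List.zip]
    · have hcnt : rest.count w = (a :: rest).count w := by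
        rw [List.count_cons_of_ne ha]
      obtain ⟨p, hpmem, hp1, hp2⟩ := ih hp.of_cons (by omega)
      exact ⟨p, pvZip_lift hpmem, hp1, hp2⟩

lemma pvZip_count (srt : List String) (hp : List.Pairwise (· ≤ ·) srt)
    (p : String × String) (hmem : p ∈ srt.zip (srt.drop 3)) (heq : p.1 = p.2) :
    4 ≤ srt.count p.1 := by
  rw [List.mem_iff_getElem] at hmem
  obtain ⟨i, hi, hig⟩ := hmem
  have hlen : i + 3 < srt.length := by
    simp only [List.length_zip, List.length_drop] at hi
    omega
  have hi1 : i < srt.length := by omega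
  have hig' : p = (srt[i], srt[i + 3]) := by
    rw [← hig, List.getElem_zip]
    congr 1
    rw [List.getElem_drop]
    congr 1
    omega
  have hmono := List.pairwise_iff_getElem.mp hp
  have h03 : srt[i] = srt[i + 3] := by
    rw [hig'] at heq
    exact heq
  have he1 : srt[i + 1] = srt[i] := by
    have a1 : srt[i] ≤ srt[i + 1] := hmono i (i+1) hi1 (by omega) (by omega)
    have a2 : srt[i + 1] ≤ srt[i + 3] := hmono (i+1) (i+3) (by omega) hlen (by omega)
    rw [← h03] at a2
    exact le_antisymm a2 a1
  have he2 : srt[i + 2] = srt[i] := by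
    have a1 : srt[i] ≤ srt[i + 2] := hmono i (i+2) hi1 (by omega) (by omega)
    have a2 : srt[i + 2] ≤ srt[i + 3] := hmono (i+2) (i+3) (by omega) hlen (by omega)
    rw [← h03] at a2
    exact le_antisymm a2 a1
  have hdrop : srt.drop i = srt[i] :: srt[i+1] :: srt[i+2] :: srt[i+3] :: srt.drop (i+4) := by
    rw [← List.getElem_cons_drop (as := srt) (i := i) hi1]
    congr 1
    rw [← List.getElem_cons_drop (as := srt) (i := i+1) (by omega)]
    congr 1
    rw [← List.getElem_cons_drop (as := srt) (i := i+2) (by omega)]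
    congr 1
    rw [← List.getElem_cons_drop (as := srt) (i := i+3) hlen]
  have hcnt4 : 4 ≤ (srt.drop i).count srt[i] := by
    rw [hdrop, he1, he2, ← h03]
    simp
  have hige : p.1 = srt[i] := by
    rw [hig']
  rw [hige]
  exact le_trans hcnt4 (List.Sublist.count_le _ (List.drop_sublist i srt))

lemma word_eq (ws : List String) :
    pvWordLoopA ws PySem.Dict.empty = pvWordCheckB ws := by
  rw [Bool.eq_iff_iff, wordLoop_iff]
  unfold pvWordCheckB
  simp only [List.any_eq_true, Bool.and_eq_true, beq_iff_eq, decide_eq_true_eq,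
    PySem.Dict.getD_empty]
  set srt := PySem.List.sorted ws (fun w => w) with hsrt
  have hperm : srt.Perm ws := PySem.List.sorted_perm ws (fun w => w) false
  have hpair : List.Pairwise (· ≤ ·) srt := by
    have := PySem.List.sorted_pairwise ws (fun w => w)
    simpa using this
  constructor
  · rintro ⟨w, hw, hlw, hcw⟩
    have h4 : 4 ≤ srt.count w := by
      rw [hperm.count_eq w]
      omega
    obtain ⟨p, hpmem, hp1, hp2⟩ := pvSorted_exists w srt hpair h4
    exact ⟨p, hpmem, by rw [hp1, hp2], by rw [hp1]; exact hlw⟩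
  · rintro ⟨p, hpmem, heq, hlp⟩
    have h4 := pvZip_count srt hpair p hpmem heq
    rw [hperm.count_eq p.1] at h4
    have hmem : p.1 ∈ ws := List.count_pos_iff.mp (by omega)
    refine ⟨p.1, hmem, hlp, ?_⟩
    omega

-- ---------- stage 4: repeated 20-char sequences ----------

lemma pvPyRange0 (b : ℤ) :
    PySem.List.pyRange 0 b = List.map (fun k : ℕ => (k : ℤ)) (List.range b.toNat) := by
  rw [PySem.List.pyRange_of_pos 0 b one_pos]
  have he : (b - 0 + 1 - 1) / 1 = b := by
    rw [Int.ediv_one]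
    ring
  rw [he]
  split_ifs with h
  · simp only [zero_add, one_mul]
  · have hz : b.toNat = 0 := by omega
    rw [hz]
    rfl

lemma pvAny_cast (b : ℤ) (p : ℤ → Bool) :
    (PySem.List.pyRange 0 b).any p = List.any (List.range b.toNat) (fun k : ℕ => p (k:ℤ)) := by
  rw [pvPyRange0, List.any_map]
  rfl

lemma pvWin_toList (text : String) (k : ℕ) :
    (PySem.Str.slice text (some (k:ℤ)) (some ((k:ℤ) + 20))).toList
      = (text.toList.drop k).take 20 := by
  rw [PySem.Str.toList_slice, PySem.Chars.slice_eq_listSlice]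
  have hc : (k:ℤ) + 20 = ((k + 20 : ℕ) : ℤ) := by push_cast; ring
  rw [hc, PySem.List.slice_natCast]
  congr 1
  omega

lemma pvGreedyB_cast : ∀ (l : List ℕ) (c : ℤ) (nxt : ℕ),
    ((List.map (fun x : ℕ => (x:ℤ)) l).foldl
        (fun (st : ℤ × ℤ) p => if st.2 ≤ p then (st.1 + 1, p + 20) else st) (c, (nxt:ℤ))).1
      = c + (pvGreedyN 20 l nxt : ℤ) := by
  intro l
  induction l with
  | nil => intro c nxt; simp [pvGreedyN]
  | cons p r ih =>
    intro c nxt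
    simp only [List.map_cons, List.foldl_cons]
    by_cases h : nxt ≤ p
    · rw [if_pos (by exact_mod_cast h)]
      have h20 : (p:ℤ) + 20 = ((p + 20 : ℕ) : ℤ) := by push_cast; ring
      rw [h20, ih]
      simp only [pvGreedyN, if_pos h]
      push_cast
      ring
    · rw [if_neg (by exact_mod_cast h)]
      rw [ih]
      simp only [pvGreedyN, if_neg h]

lemma pvGreedyB_eq (l : List ℕ) :
    pvGreedyB (List.map (fun x : ℕ => (x:ℤ)) l) = (pvGreedyN 20 l 0 : ℤ) := by
  unfold pvGreedyB
  have := pvGreedyB_cast l 0 0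
  simpa using this

lemma pvOcc_mem_le {w s : List Char} {q : ℕ} (hq : q ∈ pvOcc w s) :
    q + w.length ≤ s.length := by
  unfold pvOcc at hq
  rw [List.mem_filter] at hq
  obtain ⟨hq1, hq2⟩ := hq
  rw [List.mem_range] at hq1
  have hpre := List.isPrefixOf_iff_prefix.mp hq2
  have := hpre.length_le
  simp only [List.length_drop] at this
  omega

lemma pvOcc_win {w s : List Char} {p : ℕ} (hp : p ∈ pvOcc w s) (hw : w.length = 20)
    (hlen : p + 20 ≤ s.length) : (s.drop p).take 20 = w := by
  unfold pvOcc at hp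
  rw [List.mem_filter] at hp
  have hpre := List.isPrefixOf_iff_prefix.mp hp.2
  have := List.prefix_iff_eq_take.mp hpre
  rw [← hw, ← this]

lemma seq_eq (text : String) : pvSeqLoopA text = pvSeqCheckB text := by
  set s := text.toList with hsdef
  set n := s.length with hn
  have hlen : PySem.Str.len text = (n : ℤ) := by rw [PySem.Str.len_eq]
  -- A side
  have hA : pvSeqLoopA text = (List.range (n - 20)).any
      (fun k => decide (2 < PySem.Chars.count s ((s.drop k).take 20))) := by
    unfold pvSeqLoopA
    rw [hlen, pvAny_cast]
    have ht : ((n:ℤ) - 20).toNat = n - 20 := by omega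
    rw [ht]
    apply List.any_congr rfl
    intro k
    have hc : PySem.Str.count text (PySem.Str.slice text (some (k:ℤ)) (some ((k:ℤ) + 20)))
        = PySem.Chars.count s ((s.drop k).take 20) := by
      rw [PySem.Str.count_eq, pvWin_toList]
    rw [hc]
  -- B side
  set key : ℤ → String := fun i => PySem.Str.slice text (some i) (some (i + 20)) with hkey
  have hwin : ∀ k : ℕ, (key (k:ℤ)).toList = (s.drop k).take 20 := by
    intro k
    exact pvWin_toList text k
  have hB : pvSeqCheckB text = true ↔
      ∃ k ∈ List.range (n - 19), 2 < pvGreedyN 20 (pvOcc ((s.drop k).take 20) s) 0 := by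
    unfold pvSeqCheckB
    rw [hlen, pvPyRange0]
    have ht : ((n:ℤ) - 19).toNat = n - 19 := by omega
    rw [ht]
    set rngN := List.range (n - 19) with hrng
    set d := ((List.map (fun k : ℕ => (k:ℤ)) rngN).foldl
      (fun d i => d.modify (PySem.Str.slice text (some i) (some (i + 20))) [] (fun l => l ++ [i]))
      (PySem.Dict.empty : PySem.Dict String (List ℤ))) with hd
    have hkeys : d.keys = PySem.Set.ofList ((List.map (fun k : ℕ => (k:ℤ)) rngN).map key) := by
      rw [hd, PySem.Dict.keys_foldl_modify_key _ key, PySem.Dict.keys_empty]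
      exact PySem.Set.update_empty _
    have hnodup : d.keys.Nodup := by
      rw [hd]
      exact PySem.Dict.nodup_keys_foldl_modify_key _ key _ _ _
        (by rw [PySem.Dict.keys_empty]; exact List.nodup_nil)
    have hvals : d.values = d.keys.map (fun g => d.getD g []) :=
      PySem.Dict.values_eq_map_keys d hnodup []
    have hgetD : ∀ g, d.getD g [] =
        List.map (fun k : ℕ => (k:ℤ)) (rngN.filter (fun k => key (k:ℤ) == g)) := by
      intro g
      have h1 : d = ((List.map (fun k : ℕ => (k:ℤ)) rngN).map (fun i => (key i, i))).foldl
          (fun d p => d.modify p.1 [] (fun l => l ++ [p.2])) PySem.Dict.empty := by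
        rw [hd]
        simp only [List.foldl_map]
        rfl
      rw [h1, PySem.Dict.getD_foldl_modify_append, PySem.Dict.getD_empty]
      rw [List.map_map, List.filter_map, List.map_map]
      simp only [List.nil_append]
      rfl
    have hcore : ∀ k, k ∈ rngN → d.getD (key (k:ℤ)) []
        = List.map (fun x : ℕ => (x:ℤ)) (pvOcc ((s.drop k).take 20) s) := by
      intro k hk
      rw [hgetD]
      congr 1
      have hk' : k < n - 19 := List.mem_range.mp hk
      have hn20 : k + 20 ≤ n := by omega
      have hwlen : ((s.drop k).take 20).length = 20 := by
        simp only [List.length_take, List.length_drop]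
        omega
      have hsplitn : List.range n = rngN ++ (List.range 19).map (fun j => (n-19) + j) := by
        rw [hrng, ← List.range_add]
        congr 1
        omega
      unfold pvOcc
      rw [← hn, hsplitn, List.filter_append]
      have h2 : ((List.range 19).map (fun j => (n-19) + j)).filter
          (fun i => ((s.drop k).take 20).isPrefixOf (s.drop i)) = [] := by
        rw [List.filter_eq_nil_iff]
        intro i hi
        obtain ⟨j, hj, rfl⟩ := List.mem_map.mp hi
        rw [Bool.not_eq_true, Bool.eq_false_iff]
        intro hc
        have hpre := List.isPrefixOf_iff_prefix.mp hc
        have hle := hpre.length_le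
        rw [hwlen] at hle
        simp only [List.length_drop] at hle
        omega
      rw [h2, List.append_nil]
      apply List.filter_congr
      intro k' hk'mem
      have hk'lt : k' < n - 19 := List.mem_range.mp hk'mem
      have hk'20 : k' + 20 ≤ n := by omega
      rw [Bool.eq_iff_iff, beq_iff_eq, List.isPrefixOf_iff_prefix]
      constructor
      · intro he
        have hteq : (key (k':ℤ)).toList = (key (k:ℤ)).toList := by rw [he]
        rw [hwin, hwin] at hteq
        rw [← hteq]
        exact List.take_prefix _ _
      · intro hpre
        apply String.ext
        rw [hwin, hwin]
        have hte := List.prefix_iff_eq_take.mp hpre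
        rw [hwlen] at hte
        exact hte.symm
    show (d.values.any fun ps => decide (2 < pvGreedyB ps)) = true ↔ _
    rw [hvals, List.any_map, List.any_eq_true]
    constructor
    · rintro ⟨g, hg, hcond⟩
      rw [hkeys, PySem.Set.mem_ofList, List.map_map, List.mem_map] at hg
      obtain ⟨k, hk, hgk⟩ := hg
      have hgk' : g = key (k:ℤ) := hgk.symm
      subst hgk'
      refine ⟨k, hk, ?_⟩
      simp only [Function.comp_apply, decide_eq_true_eq] at hcond
      rw [hcore k hk, pvGreedyB_eq] at hcond
      exact_mod_cast hcond
    · rintro ⟨k, hk, hgr⟩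
      refine ⟨key (k:ℤ), ?_, ?_⟩
      · rw [hkeys, PySem.Set.mem_ofList, List.map_map]
        exact List.mem_map.mpr ⟨k, hk, rfl⟩
      · simp only [Function.comp_apply, decide_eq_true_eq]
        rw [hcore k hk, pvGreedyB_eq]
        exact_mod_cast hgr
  -- combine
  rw [Bool.eq_iff_iff, hA, List.any_eq_true, hB]
  constructor
  · rintro ⟨k, hkmem, hc⟩
    rw [List.mem_range] at hkmem
    rw [decide_eq_true_eq] at hc
    have hwlen : ((s.drop k).take 20).length = 20 := by
      simp only [List.length_take, List.length_drop]
      omega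
    have hne : (s.drop k).take 20 ≠ [] := by
      intro hcon
      rw [hcon] at hwlen
      simp at hwlen
    have hM := pvCount_eq_greedy ((s.drop k).take 20) hne s.length s rfl
    rw [hM, hwlen] at hc
    exact ⟨k, List.mem_range.mpr (by omega), hc⟩
  · rintro ⟨k, hkmem, hgr⟩
    rw [List.mem_range] at hkmem
    set w := (s.drop k).take 20 with hw
    have hwlen : w.length = 20 := by
      rw [hw]
      simp only [List.length_take, List.length_drop]
      omega
    have hne : w ≠ [] := by
      intro hcon
      rw [hcon] at hwlen
      simp at hwlen
    obtain ⟨p, hpocc, _, q, hqocc, hpq⟩ := pvGreedy_ge3 20 (pvOcc w s) 0 (by omega)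
    have hqn : q + 20 ≤ n := by
      have := pvOcc_mem_le hqocc
      rw [hwlen] at this
      exact this
    have hpn : p + 60 ≤ n := by omega
    have hwin_p : (s.drop p).take 20 = w := pvOcc_win hpocc hwlen (by omega)
    refine ⟨p, List.mem_range.mpr (by omega), ?_⟩
    rw [decide_eq_true_eq, hwin_p]
    rw [pvCount_eq_greedy w hne s.length s rfl, hwlen]
    exact hgr

-- ---------- assembly ----------

lemma guard_eq (p q : Prop) [Decidable p] [Decidable q] (x : Bool) :
    (if p then (if q then x else false) else false) = ((decide p && decide q) && x) := by
  by_cases hp : p <;> by_cases hq : q <;> simp [hp, hq]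

-- ===== VERDICT =====
theorem is_whisper_artifact_spec : Claim_equal_is_whisper_artifact := by
  intro text _
  unfold Spec_is_whisper_artifact is_whisper_artifact is_whisper_artifact_alt
  by_cases h0 : text = ""
  · simp [h0]
  · simp only [if_neg h0]
    set t := PySem.Str.strip (PySem.Str.lower text) with ht
    set words := PySem.Str.split₀ t with hwords
    have hpat := patterns_eq t
    by_cases hi : pvIndicatorsA.any (fun p => PySem.Str.isIn p t) = true
    · rw [if_pos hi, if_pos (show (pvCoreB.any fun p => PySem.Str.isIn p t) = true by
        rw [← hpat]; rw [hi]; simp)]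
    · by_cases hs : pvSuspiciousA.any (fun p => PySem.Str.isIn p t) = true
      · rw [if_neg hi, if_pos hs, if_pos (show (pvCoreB.any fun p => PySem.Str.isIn p t) = true by
          rw [← hpat]; rw [hs]; simp)]
      · have hcore : ¬((pvCoreB.any fun p => PySem.Str.isIn p t) = true) := by
          rw [← hpat]
          simp only [Bool.or_eq_true]
          rintro (h | h)
          · exact hi h
          · exact hs h
        rw [if_neg hi, if_neg hs, if_neg hcore, guard_eq, phrase_eq, word_eq, seq_eq]
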